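-- pv_equiv track=rewrite | github.com/ghedo44/PycoGK | src/picogk/_core/cli.py | _extract_parameter
-- ===== SOURCE A (Python) =====
-- def _extract_parameter(line: str) -> tuple[bool, str, str]:
--     if not line:
--         return (False, "", line)
--     if line[0] not in "/,":
--         return (False, "", line)
--     line = line[1:]
--     end = len(line)
--     for i, ch in enumerate(line):
--         if ch in "$/,":
--             end = i
--             break
--     param = line[:end]
--     rest = line[end:]
--     return (True, param, rest)
-- ===== SOURCE B (Python) =====
-- import re
--
-- # One anchored regex does all of it: a leading '/' or ',', then the maximal
-- # run of non-delimiter characters (group 1), then the remainder (group 2).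
-- _PARAM_RE = re.compile(r'[/,]([^$/,]*)(.*)', re.S)
--
-- def _extract_parameter(line: str) -> tuple[bool, str, str]:
--     m = _PARAM_RE.match(line)
--     if m is None:
--         return (False, "", line)
--     return (True, m.group(1), m.group(2))
-- ===== Notes on version B (the rewrite author's own statement) =====
-- stated objective: idiomatic
-- what changed: Replaces the explicit empty/first-char guards and the indexed for-loop with break by a single anchored regex [/,]([^$/,]*)(.*) whose two groups are the parameter and the rest.
import Mathlib
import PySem

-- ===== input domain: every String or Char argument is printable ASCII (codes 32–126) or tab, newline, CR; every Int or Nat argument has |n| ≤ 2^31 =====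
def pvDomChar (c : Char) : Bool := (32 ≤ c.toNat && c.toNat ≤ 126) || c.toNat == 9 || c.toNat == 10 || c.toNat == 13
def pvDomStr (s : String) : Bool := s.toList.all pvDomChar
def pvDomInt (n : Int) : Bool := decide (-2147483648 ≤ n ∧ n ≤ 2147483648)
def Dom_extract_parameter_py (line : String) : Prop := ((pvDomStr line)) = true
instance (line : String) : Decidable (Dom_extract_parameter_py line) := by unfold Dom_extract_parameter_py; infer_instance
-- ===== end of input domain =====

-- B replaces A's explicit guards and indexed scan-with-break by one anchored
-- regex whose two groups are the parameter and the rest (idiomatic; same cost).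

-- ===== PORT A =====
-- the for-loop with break: end = len(line); for i, ch in enumerate(line): if ch in "$/,": end = i; break
def pvLoopEnd : List Char → Nat → Nat → Nat
  | [], _, e => e
  | ch :: t, i, e => if ch = '$' ∨ ch = '/' ∨ ch = ',' then i else pvLoopEnd t (i + 1) e

-- exact over List Char: line[0], line[1:], line[:end], line[end:] are head/drop/take/drop
def extract_parameter_py (line : String) : Bool × String × String :=
  match line.toList with
  | [] => (false, "", line)                                   -- if not line
  | c0 :: _ =>
    if ¬ (c0 = '/' ∨ c0 = ',') then (false, "", line)         -- if line[0] not in "/,"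
    else
      let l := line.toList.drop 1                             -- line = line[1:]
      let e := pvLoopEnd l 0 l.length
      (true, String.ofList (l.take e), String.ofList (l.drop e))

-- ===== PORT B =====
-- the anchored regex [/,]([^$/,]*)(.*) with DOTALL: it matches iff the string
-- starts with '/' or ','; group 1 is the maximal delimiter-free run after it
-- (takeWhile), group 2 the remainder (dropWhile); this is the regex's exact meaning.
def extract_parameter_py_alt (line : String) : Bool × String × String :=
  match line.toList with
  | [] => (false, "", line)
  | c0 :: body =>
    if c0 = '/' ∨ c0 = ',' then
      (true, String.ofList (body.takeWhile (fun ch => ¬ (ch = '$' ∨ ch = '/' ∨ ch = ','))),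
             String.ofList (body.dropWhile (fun ch => ¬ (ch = '$' ∨ ch = '/' ∨ ch = ','))))
    else (false, "", line)

-- ===== PRECONDITION & SPEC =====
def Spec_extract_parameter_py (line : String) (out : Bool × String × String) : Prop := out = extract_parameter_py_alt line
instance (line : String) (out : Bool × String × String) : Decidable (Spec_extract_parameter_py line out) := by unfold Spec_extract_parameter_py; infer_instance

-- ===== CLAIM (what is proved, stated in full; the proofs are below) =====
def Claim_equal_extract_parameter_py : Prop := ∀ (line : String), Dom_extract_parameter_py line → Spec_extract_parameter_py line (extract_parameter_py line)

-- ===== LEMMAS AND PROOFS =====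

theorem pvLoopEnd_eq (l : List Char) : ∀ i : Nat,
    pvLoopEnd l i (i + l.length)
      = i + (l.takeWhile (fun ch => ¬ (ch = '$' ∨ ch = '/' ∨ ch = ','))).length := by
  induction l with
  | nil => intro i; simp [pvLoopEnd]
  | cons ch t ih =>
    intro i
    by_cases h : ch = '$' ∨ ch = '/' ∨ ch = ','
    · simp [pvLoopEnd, h, List.takeWhile]
    · have : i + (ch :: t).length = (i + 1) + t.length := by simp; omega
      simp only [pvLoopEnd, this] at *
      rw [ih (i + 1)]
      simp [List.takeWhile, h]
      omega

theorem take_takeWhile_len {α : Type} (p : α → Bool) (l : List α) :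
    l.take ((l.takeWhile p).length) = l.takeWhile p := by
  induction l with
  | nil => simp
  | cons a t ih =>
    by_cases h : p a <;> simp [List.takeWhile, h, ih]

theorem drop_takeWhile_len {α : Type} (p : α → Bool) (l : List α) :
    l.drop ((l.takeWhile p).length) = l.dropWhile p := by
  induction l with
  | nil => simp
  | cons a t ih =>
    by_cases h : p a <;> simp [List.takeWhile, List.dropWhile, h, ih]

-- ===== VERDICT (by name: the statement is the Claim_ definition above) =====
theorem extract_parameter_py_spec : Claim_equal_extract_parameter_py := by
  intro line _
  unfold Spec_extract_parameter_py extract_parameter_py extract_parameter_py_alt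
  cases hl : line.toList with
  | nil => rfl
  | cons c0 body =>
    by_cases h : c0 = '/' ∨ c0 = ','
    · have he := pvLoopEnd_eq body 0
      simp only [Nat.zero_add] at he
      simp only [h, not_true_eq_false, if_false, if_true, List.drop_succ_cons,
        List.drop_zero, he, take_takeWhile_len, drop_takeWhile_len]
    · simp [h]
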